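-- pv_equiv track=rewrite | github.com/YuansongFeng/basic | translator.py | terminate_sent
-- ===== SOURCE A (Python) =====
-- def terminate_sent(input_seq, eos_label, pad_label):
--     # input_seq: [word_0, word_1, ..., word_{n+1}]
--     start_pad = False
--     for idx, word in enumerate(input_seq):
--         if start_pad:
--             input_seq[idx] = pad_label
--         if word == eos_label:
--             start_pad = True
--     return input_seq
-- ===== SOURCE B (Python) =====
-- def terminate_sent(input_seq, eos_label, pad_label):
--     # Find-then-fill: locate the first EOS; if absent, return unchanged;
--     # otherwise overwrite the tail after it in place with pad_label.
--     try:
--         i = input_seq.index(eos_label)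
--     except ValueError:
--         return input_seq
--     input_seq[i + 1:] = [pad_label] * (len(input_seq) - (i + 1))
--     return input_seq
-- ===== Notes on version B (the rewrite author's own statement) =====
-- stated objective: alternative
-- what changed: Replaces A's single flag-driven pass (a boolean toggled mid-loop that rewrites later elements) with a find-then-fill decomposition: list.index locates the first EOS (early return if absent), then a second loop pads strictly after it.
import Mathlib
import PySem

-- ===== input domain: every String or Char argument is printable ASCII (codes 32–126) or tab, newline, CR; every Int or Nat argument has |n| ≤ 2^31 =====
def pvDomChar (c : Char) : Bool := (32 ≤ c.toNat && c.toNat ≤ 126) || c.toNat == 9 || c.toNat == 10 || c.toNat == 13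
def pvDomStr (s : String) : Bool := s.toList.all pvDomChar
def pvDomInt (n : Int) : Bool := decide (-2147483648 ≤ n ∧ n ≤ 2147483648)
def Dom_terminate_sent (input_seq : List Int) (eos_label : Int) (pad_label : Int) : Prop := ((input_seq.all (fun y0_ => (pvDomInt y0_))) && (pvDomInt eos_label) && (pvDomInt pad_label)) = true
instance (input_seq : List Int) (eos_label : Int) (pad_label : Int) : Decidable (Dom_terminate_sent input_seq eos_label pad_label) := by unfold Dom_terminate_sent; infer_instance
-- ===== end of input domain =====

-- B replaces A's single flag-driven pass with a find-then-fill decomposition (list.index,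
-- then pad the tail); alternative decomposition, same cost. Both Pythons mutate input_seq
-- in place; the equivalence proved here is about the return value.

-- ===== PORT A =====
-- A's loop: flag start_pad, each element overwritten with pad once the flag is set,
-- flag set after seeing eos_label; ported as structural recursion over (list, flag).
def terminate_sent_go (eos_label pad_label : Int) : List Int → Bool → List Int
  | [], _ => []
  | w :: ws, start_pad =>
      (if start_pad then pad_label else w) ::
        terminate_sent_go eos_label pad_label ws (start_pad || (w == eos_label))

def terminate_sent (input_seq : List Int) (eos_label : Int) (pad_label : Int) : List Int :=
  terminate_sent_go eos_label pad_label input_seq false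

-- ===== PORT B =====
-- B: i = input_seq.index(eos_label) (early return if absent); then
-- input_seq[i+1:] = [pad_label] * (len - (i+1)).
def terminate_sent_alt (input_seq : List Int) (eos_label : Int) (pad_label : Int) : List Int :=
  match PySem.List.index? input_seq eos_label with
  | none => input_seq
  | some i => input_seq.take (i + 1) ++ List.replicate (input_seq.length - (i + 1)) pad_label

-- ===== PRECONDITION & SPEC =====
def Spec_terminate_sent (input_seq : List Int) (eos_label : Int) (pad_label : Int) (out : List Int) : Prop := out = terminate_sent_alt input_seq eos_label pad_label
instance (input_seq : List Int) (eos_label : Int) (pad_label : Int) (out : List Int) : Decidable (Spec_terminate_sent input_seq eos_label pad_label out) := by unfold Spec_terminate_sent; infer_instance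

-- ===== CLAIM (what is proved, stated in full; the proofs are below) =====
def Claim_equal_terminate_sent : Prop := ∀ (input_seq : List Int) (eos_label : Int) (pad_label : Int), Dom_terminate_sent input_seq eos_label pad_label → Spec_terminate_sent input_seq eos_label pad_label (terminate_sent input_seq eos_label pad_label)

-- ===== LEMMAS AND PROOFS =====
theorem terminate_sent_go_true (eos_label pad_label : Int) (xs : List Int) :
    terminate_sent_go eos_label pad_label xs true = List.replicate xs.length pad_label := by
  induction xs with
  | nil => rfl
  | cons x xs ih => simp [terminate_sent_go, ih, List.replicate_succ]

theorem terminate_sent_go_false (eos_label pad_label : Int) (xs : List Int) :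
    terminate_sent_go eos_label pad_label xs false = terminate_sent_alt xs eos_label pad_label := by
  induction xs with
  | nil => rfl
  | cons x xs ih =>
    by_cases hx : x = eos_label
    · subst hx
      rw [terminate_sent_alt, PySem.List.index?_cons_self]
      simp [terminate_sent_go, terminate_sent_go_true]
    · rw [terminate_sent_alt, PySem.List.index?_cons_of_ne xs hx]
      rw [terminate_sent_alt] at ih
      simp only [terminate_sent_go, Bool.false_or, Bool.false_eq_true, if_false]
      rw [show (x == eos_label) = false by simp [hx], ih]
      cases h : PySem.List.index? xs eos_label with
      | none => simp
      | some i =>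
        simp [List.take_succ_cons, List.length_cons]

-- ===== VERDICT (by name: the statement is the Claim_ definition above) =====
theorem terminate_sent_spec : Claim_equal_terminate_sent := by
  intro xs e p _
  show _ = _
  exact terminate_sent_go_false e p xs
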